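-- pv_equiv track=rewrite | github.com/opendatalab/MinerU | mineru/model/docx/docx_converter.py | _split_paragraph_elements_at_eq_boundaries
-- ===== SOURCE A (Python) =====
-- def _split_paragraph_elements_at_eq_boundaries(
--     paragraph_elements: list,
--     non_eq_segments: list,
-- ) -> list:
--     """
--     在公式边界处拆分段落元素，解决格式标注跨公式边界失效的问题。
--
--     当 _get_paragraph_elements 处理含公式（oMath）的段落时，python-docx 的
--     iter_inner_content() 不会遍历 oMath 元素。如果公式前后的文本格式相同，
--     它们会被合并为单个元素，导致文本跨越 <eq> 标签两侧。
--     _replace_text_outside_equations 只在单个非公式片段中搜索，无法找到跨片段的文本，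
--     从而导致样式替换失败。
--
--     本方法通过将这些跨边界的合并元素重新拆分为多个片段来修复此问题，
--     使每个元素都对应 text_with_equations 中唯一的非公式片段。
--
--     Args:
--         paragraph_elements: (text, format, hyperlink) 元组的列表
--         non_eq_segments:     从 text_with_equations 中提取的非公式文本片段列表
--
--     Returns:
--         重新拆分后的 (text, format, hyperlink) 列表，每个元素均位于单个公式片段内
--     """
--     if len(non_eq_segments) <= 1:
--         return paragraph_elements
--
--     # 计算各非公式片段的累积结束位置，作为分割边界
--     boundaries: set[int] = set()
--     pos = 0
--     for seg in non_eq_segments[:-1]:   # 最后一个片段后无需分割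
--         pos += len(seg)
--         boundaries.add(pos)
--
--     if not boundaries:
--         return paragraph_elements
--
--     # 验证段落元素的拼接文本与非公式片段的拼接文本一致
--     concat_elem_text = "".join(text for text, _, _ in paragraph_elements)
--     concat_seg_text = "".join(non_eq_segments)
--     if concat_elem_text != concat_seg_text:
--         # 文本不匹配时安全降级：原样返回
--         return paragraph_elements
--
--     # 在边界处分割元素
--     result = []
--     text_pos = 0
--     for (text, fmt, hyperlink) in paragraph_elements:
--         if not text:
--             result.append((text, fmt, hyperlink))
--             text_pos += len(text)
--             continue
--
--         elem_start = text_pos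
--         elem_end = elem_start + len(text)
--         text_pos = elem_end
--
--         # 找到落在该元素内部的分割点
--         splits_in_elem = sorted(
--             b - elem_start for b in boundaries if elem_start < b < elem_end
--         )
--
--         if not splits_in_elem:
--             result.append((text, fmt, hyperlink))
--         else:
--             prev = 0
--             for split_pos in splits_in_elem:
--                 fragment = text[prev:split_pos]
--                 if fragment:
--                     result.append((fragment, fmt, hyperlink))
--                 prev = split_pos
--             fragment = text[prev:]
--             if fragment:
--                 result.append((fragment, fmt, hyperlink))
--
--     return result
-- ===== SOURCE B (Python) =====
-- def _split_paragraph_elements_at_eq_boundaries(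
--     paragraph_elements: list,
--     non_eq_segments: list,
-- ) -> list:
--     """Single sorted-cut sweep: boundaries are produced already sorted (cumulative
--     sums), deduplicated on the fly, and consumed left-to-right by one pointer while
--     walking the elements once - no per-element rescan or re-sort of the boundaries."""
--     if len(non_eq_segments) <= 1:
--         return paragraph_elements
--
--     # Cumulative end positions are nondecreasing: build the sorted, distinct cut
--     # list directly (skip a cut equal to the previous one).
--     cuts = []
--     pos = 0
--     for seg in non_eq_segments[:-1]:
--         pos += len(seg)
--         if not cuts or cuts[-1] != pos:
--             cuts.append(pos)
--
--     if "".join(t for t, _, _ in paragraph_elements) != "".join(non_eq_segments):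
--         return paragraph_elements
--
--     result = []
--     i = 0          # pointer into cuts; never moves backwards
--     start = 0
--     for text, fmt, hyperlink in paragraph_elements:
--         end = start + len(text)
--         while i < len(cuts) and cuts[i] <= start:
--             i += 1
--         prev = start
--         while i < len(cuts) and cuts[i] < end:
--             result.append((text[prev - start:cuts[i] - start], fmt, hyperlink))
--             prev = cuts[i]
--             i += 1
--         result.append((text[prev - start:], fmt, hyperlink))
--         start = end
--     return result
-- ===== Notes on version B (the rewrite author's own statement) =====
-- stated objective: alternative
-- what changed: Instead of rebuilding an unordered boundary set and, for every element, rescanning and re-sorting all boundaries, B emits the cumulative boundary positions already sorted and deduplicated and consumes them with a single forward pointer while walking the elements once.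
import Mathlib
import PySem

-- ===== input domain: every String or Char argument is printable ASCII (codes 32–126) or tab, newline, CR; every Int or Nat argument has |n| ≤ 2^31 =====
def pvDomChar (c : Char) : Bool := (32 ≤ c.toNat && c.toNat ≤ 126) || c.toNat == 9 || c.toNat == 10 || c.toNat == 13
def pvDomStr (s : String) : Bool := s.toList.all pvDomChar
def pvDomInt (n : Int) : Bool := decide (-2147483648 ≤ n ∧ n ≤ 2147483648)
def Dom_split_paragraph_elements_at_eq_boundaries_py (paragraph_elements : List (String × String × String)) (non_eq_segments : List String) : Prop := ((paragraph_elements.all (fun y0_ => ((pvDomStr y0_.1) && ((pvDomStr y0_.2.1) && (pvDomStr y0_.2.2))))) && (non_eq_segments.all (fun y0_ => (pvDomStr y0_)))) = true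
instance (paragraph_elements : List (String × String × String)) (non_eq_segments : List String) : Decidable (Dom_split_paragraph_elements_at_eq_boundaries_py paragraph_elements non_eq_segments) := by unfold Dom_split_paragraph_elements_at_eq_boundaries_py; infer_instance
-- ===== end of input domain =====

-- ===== PORT A =====
-- B rewrite: boundaries are built already sorted & deduplicated and consumed by one
-- left-to-right pointer sweep over the elements, instead of A's per-element rescan
-- and re-sort of an unordered boundary set (objective: alternative single-sweep algorithm).

-- 'pos += len(seg); boundaries.add(pos)' — one iteration of A's boundary loop
def pvA_buildStep (st : Int × PySem.Set Int) (seg : String) : Int × PySem.Set Int :=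
  let pos := st.1 + PySem.Str.len seg
  (pos, PySem.Set.add st.2 pos)

-- one iteration of A's 'for (text, fmt, hyperlink) in paragraph_elements' loop
def pvA_elemStep (boundaries : List Int) (st : List (String × String × String) × Int)
    (e : String × String × String) : List (String × String × String) × Int :=
  let text := e.1
  if text = "" then (st.1 ++ [(text, e.2.1, e.2.2)], st.2 + PySem.Str.len text)
  else
    let elem_start := st.2
    let elem_end := elem_start + PySem.Str.len text
    let splits_in_elem := PySem.List.sorted
      ((boundaries.filter (fun b => decide (elem_start < b) && decide (b < elem_end))).map
        (fun b => b - elem_start)) (fun x => x)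
    if splits_in_elem = [] then (st.1 ++ [(text, e.2.1, e.2.2)], elem_end)
    else
      let inner := splits_in_elem.foldl (fun ac sp =>
        let fragment := PySem.Str.slice text (some ac.2) (some sp)
        (if fragment ≠ "" then ac.1 ++ [(fragment, e.2.1, e.2.2)] else ac.1, sp)) (st.1, (0 : Int))
      let fragment := PySem.Str.slice text (some inner.2) none
      (if fragment ≠ "" then inner.1 ++ [(fragment, e.2.1, e.2.2)] else inner.1, elem_end)

def split_paragraph_elements_at_eq_boundaries_py (paragraph_elements : List (String × String × String)) (non_eq_segments : List String) : List (String × String × String) :=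
  if non_eq_segments.length ≤ 1 then paragraph_elements
  else
    let boundaries := ((PySem.List.slice non_eq_segments none (some (-1))).foldl pvA_buildStep ((0 : Int), PySem.Set.empty)).2
    if boundaries = [] then paragraph_elements
    else
      let concat_elem_text := PySem.Str.join "" (paragraph_elements.map (fun e => e.1))
      let concat_seg_text := PySem.Str.join "" non_eq_segments
      if concat_elem_text ≠ concat_seg_text then paragraph_elements
      else (paragraph_elements.foldl (pvA_elemStep boundaries) ([], (0 : Int))).1

-- ===== PORT B =====
-- 'pos += len(seg); if not cuts or cuts[-1] != pos: cuts.append(pos)'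
def pvB_buildStep (st : Int × List Int) (seg : String) : Int × List Int :=
  let pos := st.1 + PySem.Str.len seg
  (pos, if st.2.getLast? = some pos then st.2 else st.2 ++ [pos])

-- 'while i < len(cuts) and cuts[i] <= start: i += 1' (pointer advance = dropping a prefix)
def pvSkipLE (start : Int) : List Int → List Int
  | [] => []
  | b :: rest => if b ≤ start then pvSkipLE start rest else b :: rest

-- 'while i < len(cuts) and cuts[i] < end: append fragment; prev = cuts[i]; i += 1'
-- returns (fragments appended by this loop, final prev, remaining cuts)
def pvEmit (text fmt hyperlink : String) (start en : Int) (prev : Int) :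
    List Int → List (String × String × String) × Int × List Int
  | [] => ([], prev, [])
  | b :: rest =>
    if b < en then
      let out := pvEmit text fmt hyperlink start en b rest
      ((PySem.Str.slice text (some (prev - start)) (some (b - start)), fmt, hyperlink) :: out.1,
        out.2)
    else ([], prev, b :: rest)

-- one iteration of B's element loop; state = (result, start, remaining cuts)
def pvB_elemStep (st : List (String × String × String) × Int × List Int)
    (e : String × String × String) : List (String × String × String) × Int × List Int :=
  let text := e.1
  let start := st.2.1
  let en := start + PySem.Str.len text
  let cs := pvSkipLE start st.2.2
  let em := pvEmit text e.2.1 e.2.2 start en start cs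
  (st.1 ++ em.1 ++ [(PySem.Str.slice text (some (em.2.1 - start)) none, e.2.1, e.2.2)], en, em.2.2)

def split_paragraph_elements_at_eq_boundaries_py_alt (paragraph_elements : List (String × String × String)) (non_eq_segments : List String) : List (String × String × String) :=
  if non_eq_segments.length ≤ 1 then paragraph_elements
  else
    let cuts := ((PySem.List.slice non_eq_segments none (some (-1))).foldl pvB_buildStep ((0 : Int), [])).2
    if PySem.Str.join "" (paragraph_elements.map (fun e => e.1)) ≠ PySem.Str.join "" non_eq_segments
    then paragraph_elements
    else (paragraph_elements.foldl pvB_elemStep ([], (0 : Int), cuts)).1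

-- ===== PRECONDITION & SPEC =====
def Spec_split_paragraph_elements_at_eq_boundaries_py (paragraph_elements : List (String × String × String)) (non_eq_segments : List String) (out : List (String × String × String)) : Prop := out = split_paragraph_elements_at_eq_boundaries_py_alt paragraph_elements non_eq_segments
instance (paragraph_elements : List (String × String × String)) (non_eq_segments : List String) (out : List (String × String × String)) : Decidable (Spec_split_paragraph_elements_at_eq_boundaries_py paragraph_elements non_eq_segments out) := by unfold Spec_split_paragraph_elements_at_eq_boundaries_py; infer_instance

-- ===== CLAIM (what is proved, stated in full; the proofs are below) =====
def Claim_equal_split_paragraph_elements_at_eq_boundaries_py : Prop := ∀ (paragraph_elements : List (String × String × String)) (non_eq_segments : List String), Dom_split_paragraph_elements_at_eq_boundaries_py paragraph_elements non_eq_segments → Spec_split_paragraph_elements_at_eq_boundaries_py paragraph_elements non_eq_segments (split_paragraph_elements_at_eq_boundaries_py paragraph_elements non_eq_segments)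

-- ===== LEMMAS AND PROOFS =====

-- in a strictly increasing list bounded by v, membership of v means v is the last element
theorem pvLast_mem_iff (S : List Int) (v : Int) (hp : S.Pairwise (· < ·))
    (hb : ∀ x ∈ S, x ≤ v) : v ∈ S ↔ S.getLast? = some v := by
  induction S with
  | nil => simp
  | cons a t ih =>
    rcases List.pairwise_cons.mp hp with ⟨ha, hp'⟩
    cases t with
    | nil => simp [eq_comm]
    | cons c t' =>
      have h1 : v ∈ c :: t' ↔ (c :: t').getLast? = some v :=
        ih hp' (fun x hx => hb x (List.mem_cons_of_mem _ hx))
      have hav : a ≠ v := by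
        intro h
        have := ha c (List.mem_cons_self ..)
        have := hb c (by simp)
        omega
      simp only [List.getLast?_cons_cons, List.mem_cons] at h1 ⊢
      rw [← h1]
      constructor
      · rintro (h | h)
        · exact absurd h.symm hav
        · exact h
      · exact Or.inr

-- the two boundary-building folds agree and keep the cut list sorted and bounded
theorem pvBuild_eq (ls : List String) (p : Int) (S : List Int)
    (hp : S.Pairwise (· < ·)) (hb : ∀ x ∈ S, x ≤ p) :
    ls.foldl pvA_buildStep (p, S) = ls.foldl pvB_buildStep (p, S)
    ∧ (ls.foldl pvB_buildStep (p, S)).2.Pairwise (· < ·)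
    ∧ (∀ x ∈ (ls.foldl pvB_buildStep (p, S)).2, x ≤ (ls.foldl pvB_buildStep (p, S)).1) := by
  induction ls generalizing p S with
  | nil => exact ⟨rfl, hp, hb⟩
  | cons seg rest ih =>
    simp only [List.foldl_cons]
    have hlen : (0 : Int) ≤ PySem.Str.len seg := by
      rw [PySem.Str.len_eq]; positivity
    set pos := p + PySem.Str.len seg with hpos
    have hble : ∀ x ∈ S, x ≤ pos := fun x hx => by have := hb x hx; omega
    have hstep : pvA_buildStep (p, S) seg = pvB_buildStep (p, S) seg := by
      simp only [pvA_buildStep, pvB_buildStep, PySem.Set.add, PySem.Set.contains]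
      by_cases hv : pos ∈ S
      · rw [if_pos (by simpa using hv), if_pos ((pvLast_mem_iff S pos hp hble).mp hv)]
      · rw [if_neg (by simpa using hv),
          if_neg (fun h => hv (List.mem_of_getLast? h))]
    have hS' : pvB_buildStep (p, S) seg = (pos, if S.getLast? = some pos then S else S ++ [pos]) := rfl
    rw [hstep, hS']
    by_cases hl : S.getLast? = some pos
    · rw [if_pos hl]
      exact ih pos S hp hble
    · rw [if_neg hl]
      have hnot : pos ∉ S := fun h => hl ((pvLast_mem_iff S pos hp hble).mp h)
      refine ih pos (S ++ [pos]) ?_ ?_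
      · rw [List.pairwise_append]
        refine ⟨hp, List.pairwise_singleton _ _, ?_⟩
        intro x hx y hy
        simp only [List.mem_singleton] at hy
        subst hy
        have h1 := hble x hx
        have h2 : x ≠ pos := fun h => hnot (h ▸ hx)
        omega
      · intro x hx
        rcases List.mem_append.mp hx with h | h
        · exact hble x h
        · simp only [List.mem_singleton] at h; omega

-- once nonempty, the cut list stays nonempty
theorem pvBuild_ne_nil (ls : List String) (p : Int) (S : List Int) (h : S ≠ []) :
    (ls.foldl pvB_buildStep (p, S)).2 ≠ [] := by
  induction ls generalizing p S with
  | nil => exact h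
  | cons seg rest ih =>
    simp only [List.foldl_cons, pvB_buildStep]
    apply ih
    split
    · exact h
    · simp

-- pvSkipLE drops a prefix of elements ≤ start
theorem pvSkipLE_decomp (a : Int) (l : List Int) :
    ∃ d, l = d ++ pvSkipLE a l ∧ ∀ b ∈ d, b ≤ a := by
  induction l with
  | nil => exact ⟨[], by simp [pvSkipLE]⟩
  | cons b rest ih =>
    by_cases hb : b ≤ a
    · rcases ih with ⟨d, hd, hle⟩
      refine ⟨b :: d, ?_, ?_⟩
      · simp [pvSkipLE, hb, ← hd]
      · intro x hx
        rcases List.mem_cons.mp hx with h | h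
        · omega
        · exact hle x h
    · exact ⟨[], by simp [pvSkipLE, hb]⟩

-- everything pvSkipLE keeps is > start (on a sorted list)
theorem pvSkipLE_gt (a : Int) (l : List Int) (hp : l.Pairwise (· < ·)) :
    ∀ x ∈ pvSkipLE a l, a < x := by
  induction l with
  | nil => simp [pvSkipLE]
  | cons b rest ih =>
    rcases List.pairwise_cons.mp hp with ⟨hb, hp'⟩
    by_cases h : b ≤ a
    · simpa [pvSkipLE, h] using ih hp'
    · intro x hx
      simp only [pvSkipLE, if_neg h] at hx
      rcases List.mem_cons.mp hx with rfl | hx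
      · omega
      · have := hb x hx; omega

-- a filter with an always-false predicate on a bounded prefix
theorem pvFilter_prefix_nil (a e : Int) (d : List Int) (hle : ∀ b ∈ d, b ≤ a) :
    d.filter (fun b => decide (a < b) && decide (b < e)) = [] := by
  rw [List.filter_eq_nil_iff]
  intro b hb
  have := hle b hb
  simp only [Bool.and_eq_true, decide_eq_true_eq]
  omega

-- on a sorted tail whose elements are all > a, the window filter is a takeWhile
theorem pvFilter_takeWhile (a e : Int) (l : List Int) (hp : l.Pairwise (· < ·))
    (hgt : ∀ x ∈ l, a < x) :
    l.filter (fun b => decide (a < b) && decide (b < e)) = l.takeWhile (fun b => decide (b < e)) := by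
  induction l with
  | nil => rfl
  | cons b rest ih =>
    rcases List.pairwise_cons.mp hp with ⟨hb, hp'⟩
    have hab : a < b := hgt b (List.mem_cons_self ..)
    rw [List.filter_cons, List.takeWhile_cons]
    by_cases hbe : b < e
    · rw [if_pos (by simp [hab, hbe]), if_pos (by simp [hbe]),
        ih hp' (fun x hx => hgt x (List.mem_cons_of_mem _ hx))]
    · rw [if_neg (by simp [hbe]), if_neg (by simp [hbe])]
      exact List.filter_eq_nil_iff.mpr fun x hx => by
        have := hb x hx
        simp only [Bool.and_eq_true, decide_eq_true_eq]
        omega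

-- a slice with genuinely crossing bounds is a nonempty string
theorem pvSlice_ne_empty (s : String) (a b : Int) (h0 : 0 ≤ a) (hab : a < b)
    (hlen : a < PySem.Str.len s) : PySem.Str.slice s (some a) (some b) ≠ "" := by
  intro h
  have h1 : (PySem.Str.slice s (some a) (some b)).toList = [] := by
    rw [h]; rfl
  rw [PySem.Str.toList_slice, PySem.Chars.slice_eq_listSlice] at h1
  have h2 := PySem.List.length_slice s.toList a b
  rw [h1] at h2
  have hlen' : a.toNat < s.toList.length := by
    rw [PySem.Str.len_eq] at hlen; omega
  simp only [List.length_nil] at h2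
  unfold PySem.List.clampIdx at h2
  rw [if_neg (by omega), if_neg (by omega)] at h2
  omega

-- same for a tail slice
theorem pvSliceFrom_ne_empty (s : String) (a : Int) (h0 : 0 ≤ a)
    (hlen : a < PySem.Str.len s) : PySem.Str.slice s (some a) none ≠ "" := by
  intro h
  have h1 : (PySem.Str.slice s (some a) none).toList = [] := by rw [h]; rfl
  rw [PySem.Str.toList_slice, PySem.Chars.slice_eq_listSlice,
    PySem.List.slice_from _ h0] at h1
  have h2 : s.toList.length - a.toNat = 0 := by
    have := congrArg List.length h1
    simpa using this
  rw [PySem.Str.len_eq] at hlen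
  omega

theorem pvSlice_zero_none (s : String) : PySem.Str.slice s (some 0) none = s := by
  show String.ofList (PySem.Chars.slice s.toList (some 0) none) = s
  rw [PySem.Chars.slice_eq_listSlice, PySem.List.slice_from _ (le_refl 0)]
  simp [String.ofList_toList]

-- pvEmit computes exactly A's inner fragment fold over the in-window boundaries,
-- leaves the out-of-window suffix, and keeps prev inside [start, en)
theorem pvEmit_inner (text f h : String) (start en : Int)
    (hen : en = start + PySem.Str.len text) :
    ∀ (cs : List Int) (prev : Int) (res : List (String × String × String)),
    cs.Pairwise (· < ·) → (∀ b ∈ cs, prev < b) → start ≤ prev → prev < en →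
    ((cs.takeWhile (fun b => decide (b < en))).map (fun b => b - start)).foldl
        (fun ac sp =>
          let fragment := PySem.Str.slice text (some ac.2) (some sp)
          (if fragment ≠ "" then ac.1 ++ [(fragment, f, h)] else ac.1, sp)) (res, prev - start)
      = (res ++ (pvEmit text f h start en prev cs).1,
          (pvEmit text f h start en prev cs).2.1 - start)
    ∧ (pvEmit text f h start en prev cs).2.2 = cs.dropWhile (fun b => decide (b < en))
    ∧ start ≤ (pvEmit text f h start en prev cs).2.1
    ∧ (pvEmit text f h start en prev cs).2.1 < en := by
  intro cs
  induction cs with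
  | nil =>
    intro prev res _ _ hsp hpe
    exact ⟨by simp [pvEmit], by simp [pvEmit], hsp, hpe⟩
  | cons b rest ih =>
    intro prev res hp hgt hsp hpe
    rcases List.pairwise_cons.mp hp with ⟨hb, hp'⟩
    by_cases hben : b < en
    · have hprevb : prev < b := hgt b (List.mem_cons_self ..)
      have hfrag : PySem.Str.slice text (some (prev - start)) (some (b - start)) ≠ "" := by
        apply pvSlice_ne_empty <;> omega
      have hrec := ih b
        (res ++ [(PySem.Str.slice text (some (prev - start)) (some (b - start)), f, h)])
        hp' hb (by omega) (by omega)
      refine ⟨?_, ?_, ?_, ?_⟩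
      · simp only [List.takeWhile_cons, hben, decide_true, if_true, List.map_cons,
          List.foldl_cons]
        simp only [ne_eq, hfrag, not_false_iff, if_true]
        rw [hrec.1]
        simp [pvEmit, hben]
      · simp only [pvEmit, List.dropWhile_cons, hben, decide_true, if_true]
        exact hrec.2.1
      · simp only [pvEmit, if_pos hben]
        exact hrec.2.2.1
      · simp only [pvEmit, if_pos hben]
        exact hrec.2.2.2
    · simp only [pvEmit, if_neg hben]
      refine ⟨?_, ?_, hsp, hpe⟩
      · simp [hben]
      · simp [hben]

-- when every remaining cut is past the element, pvEmit is a no-op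
theorem pvEmit_nil (text f h : String) (start en prev : Int) (cs : List Int)
    (hge : ∀ x ∈ cs, ¬ x < en) :
    pvEmit text f h start en prev cs = ([], prev, cs) := by
  cases cs with
  | nil => rfl
  | cons b rest =>
    simp [pvEmit, hge b (List.mem_cons_self ..)]

-- main loop: A's fold with the full boundary list = B's fold with the remaining suffix
theorem pvLoop_eq (pe : List (String × String × String)) (L : List Int)
    (hp : L.Pairwise (· < ·)) :
    ∀ (d rem : List Int) (res : List (String × String × String)) (start : Int),
    L = d ++ rem → (∀ b ∈ d, b ≤ start) →
    pe.foldl (pvA_elemStep L) (res, start)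
      = ((pe.foldl pvB_elemStep (res, start, rem)).1,
          (pe.foldl pvB_elemStep (res, start, rem)).2.1) := by
  induction pe with
  | nil => intro d rem res start _ _; rfl
  | cons e pe ih =>
    intro d rem res start hL hd
    have hremp : rem.Pairwise (· < ·) := ((List.pairwise_append.mp (hL ▸ hp)).2.1)
    obtain ⟨dsk, hdsk, hdskle⟩ := pvSkipLE_decomp start rem
    set cs := pvSkipLE start rem with hcs
    have hcsp : cs.Pairwise (· < ·) := (List.pairwise_append.mp (hdsk ▸ hremp)).2.1
    have hcsgt : ∀ x ∈ cs, start < x := pvSkipLE_gt start rem hremp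
    have hlen0 : (0 : Int) ≤ PySem.Str.len e.1 := by rw [PySem.Str.len_eq]; positivity
    set en := start + PySem.Str.len e.1 with hen
    set W := cs.takeWhile (fun b => decide (b < en)) with hW
    have hcsdec : cs = W ++ cs.dropWhile (fun b => decide (b < en)) :=
      (List.takeWhile_append_dropWhile ..).symm
    have hWlt : ∀ b ∈ W, b < en := by
      intro b hb
      rw [hW] at hb
      exact of_decide_eq_true (List.mem_takeWhile_imp (p := fun x => decide (x < en)) hb)
    have hfilter : L.filter (fun b => decide (start < b) && decide (b < en)) = W := by
      rw [hL, List.filter_append, pvFilter_prefix_nil start en d hd, List.nil_append,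
        hdsk, List.filter_append, pvFilter_prefix_nil start en dsk hdskle, List.nil_append,
        pvFilter_takeWhile start en cs hcsp hcsgt]
    have hWp : W.Pairwise (· < ·) := (List.pairwise_append.mp (hcsdec ▸ hcsp)).1
    have hsorted : PySem.List.sorted (W.map (fun b => b - start)) (fun x => x)
        = W.map (fun b => b - start) := by
      apply PySem.List.sorted_eq_of_perm_of_pairwise_lt
      · exact List.Perm.refl _
      · exact List.pairwise_map.mpr (hWp.imp (by intro a b hab; omega))
    have hd' : L = (d ++ dsk ++ W) ++ cs.dropWhile (fun b => decide (b < en)) := by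
      rw [hL, hdsk]
      conv_lhs => rw [hcsdec]
      simp
    have hd'le : ∀ b ∈ d ++ dsk ++ W, b ≤ en := by
      intro b hb
      rcases List.mem_append.mp hb with hb | hb
      · rcases List.mem_append.mp hb with hb | hb
        · have := hd b hb; omega
        · have := hdskle b hb; omega
      · have := hWlt b hb; omega
    set em := pvEmit e.1 e.2.1 e.2.2 start en start cs with hem
    have hBstep : pvB_elemStep (res, start, rem) e
        = (res ++ em.1 ++ [(PySem.Str.slice e.1 (some (em.2.1 - start)) none, e.2.1, e.2.2)],
            en, em.2.2) := by
      simp only [pvB_elemStep, ← hcs, ← hen, ← hem]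
    have hkey : pvA_elemStep L (res, start) e
          = (res ++ em.1 ++ [(PySem.Str.slice e.1 (some (em.2.1 - start)) none, e.2.1, e.2.2)],
              en)
        ∧ em.2.2 = cs.dropWhile (fun b => decide (b < en)) := by
      by_cases htext : e.1 = ""
      · have hlenz : PySem.Str.len e.1 = 0 := by rw [htext]; rfl
        have hen0 : en = start := by omega
        have hcge : ∀ x ∈ cs, ¬ x < en := fun x hx => by have := hcsgt x hx; omega
        have hemit : em = ([], start, cs) := hem ▸ pvEmit_nil _ _ _ _ _ _ _ hcge
        rw [hemit]
        refine ⟨?_, ?_⟩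
        · simp only [pvA_elemStep, if_pos htext]
          rw [show start - start = (0 : Int) by omega, pvSlice_zero_none]
          simp [hen]
        · cases hcs2 : cs with
          | nil => rfl
          | cons b rest =>
            have hbb : ¬ b < en := hcge b (by rw [hcs2]; exact List.mem_cons_self ..)
            simp [hbb]
      · have hlenpos : (0 : Int) < PySem.Str.len e.1 := by
          rw [PySem.Str.len_eq]
          have h1 : e.1.toList ≠ [] := fun hnil => htext (String.toList_eq_nil_iff.mp hnil)
          have := List.length_pos_iff.mpr h1
          omega
        have hemit := pvEmit_inner e.1 e.2.1 e.2.2 start en hen cs start res hcsp hcsgt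
          (le_refl start) (by omega)
        rw [← hem, ← hW] at hemit
        refine ⟨?_, hemit.2.1⟩
        simp only [pvA_elemStep, if_neg htext, ← hen, hfilter, hsorted]
        by_cases hWnil : W = []
        · rw [if_pos (by simp [hWnil])]
          have h1 := hemit.1
          rw [hWnil] at h1
          simp only [List.map_nil, List.foldl_nil, Prod.mk.injEq] at h1
          have hem1 : em.1 = [] := by
            have := h1.1
            rwa [List.self_eq_append_right] at this
          have hem2 : em.2.1 = start := by have := h1.2; omega
          rw [hem1, hem2, show start - start = (0 : Int) by omega, pvSlice_zero_none]
          simp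
        · rw [if_neg (by simpa using hWnil)]
          rw [show (start - start : Int) = 0 by omega] at hemit
          rw [hemit.1]
          have hfrag : PySem.Str.slice e.1 (some (em.2.1 - start)) none ≠ "" := by
            apply pvSliceFrom_ne_empty
            · have := hemit.2.2.1; omega
            · have := hemit.2.2.2; omega
          simp [hfrag]
    rw [List.foldl_cons, List.foldl_cons, hkey.1, hBstep]
    rw [← hkey.2] at hd'
    refine ih (d ++ dsk ++ W) em.2.2 _ en ?_ hd'le
    rw [hd']

-- ===== VERDICT (by name: the statement is the Claim_ definition above) =====
theorem split_paragraph_elements_at_eq_boundaries_py_spec : Claim_equal_split_paragraph_elements_at_eq_boundaries_py := by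
  intro pe segs _
  unfold Spec_split_paragraph_elements_at_eq_boundaries_py
  unfold split_paragraph_elements_at_eq_boundaries_py split_paragraph_elements_at_eq_boundaries_py_alt
  by_cases hlen : segs.length ≤ 1
  · simp [hlen]
  · rw [if_neg hlen, if_neg hlen]
    have hbuild := pvBuild_eq (PySem.List.slice segs none (some (-1))) 0 []
      (List.Pairwise.nil) (by simp)
    set ls := PySem.List.slice segs none (some (-1)) with hls
    have hcuts : (ls.foldl pvA_buildStep ((0 : Int), PySem.Set.empty)).2
        = (ls.foldl pvB_buildStep ((0 : Int), [])).2 := by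
      have : PySem.Set.empty = ([] : List Int) := rfl
      rw [this, hbuild.1]
    set cuts := (ls.foldl pvB_buildStep ((0 : Int), [])).2 with hcutsdef
    have hne : cuts ≠ [] := by
      have hlsne : ls ≠ [] := by
        rw [hls, PySem.List.slice_to_neg_one]
        intro h
        have := congrArg List.length h
        simp only [List.length_dropLast, List.length_nil] at this
        omega
      cases hls' : ls with
      | nil => exact absurd hls' hlsne
      | cons s rest =>
        rw [hcutsdef, hls', List.foldl_cons]
        have hfirst : pvB_buildStep ((0 : Int), ([] : List Int)) s
            = (PySem.Str.len s, [PySem.Str.len s]) := by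
          simp [pvB_buildStep]
        rw [hfirst]
        exact pvBuild_ne_nil rest _ _ (by simp)
    rw [hcuts, if_neg hne]
    by_cases hj : PySem.Str.join "" (pe.map (fun e => e.1)) ≠ PySem.Str.join "" segs
    · rw [if_pos hj, if_pos hj]
    · rw [if_neg hj, if_neg hj]
      have := pvLoop_eq pe cuts hbuild.2.1 [] cuts [] 0 (by simp) (by simp)
      rw [this]
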